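-- pv_equiv track=rewrite | github.com/userdefault13/Aseprite-Mappie | src/tilemap_generator/aseprite_cli.py | build_tile_spec_string
-- ===== SOURCE A (Python) =====
-- SOLID_TILE_COLORS: dict[str, tuple[int, int, int, int]] = {
--     "G": (104, 178, 76, 255),
--     ".": (104, 178, 76, 255),
--     "~": (72, 132, 224, 255),
--     "`": (48, 96, 180, 255),  # Deep water
--     "T": (46, 108, 54, 255),
--     "F": (30, 78, 40, 255),
--     "P": (181, 152, 102, 255),
--     "S": (250, 228, 92, 255),
--     "J": (255, 161, 77, 255),
--     "M": (125, 126, 134, 255),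
--     "H": (214, 123, 73, 255),
--     "C": (194, 76, 76, 255),
--     "D": (240, 95, 95, 255),
--     "N": (86, 208, 220, 255),
-- }
--
-- CHAR_PRIORITY = list(SOLID_TILE_COLORS.keys())
--
-- def fallback_color_for_id(tile_id: int) -> tuple[int, int, int, int]:
--     seed = (tile_id * 1103515245 + 12345) & 0xFFFFFFFF
--     r = 50 + (seed & 0x7F)
--     g = 50 + ((seed >> 8) & 0x7F)
--     b = 50 + ((seed >> 16) & 0x7F)
--     return (r, g, b, 255)
--
-- def choose_char_for_tile_id(legend: dict[str, int]) -> dict[int, str]: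
--     priority: dict[str, int] = {char: idx for idx, char in enumerate(CHAR_PRIORITY)}
--     by_id: dict[int, list[str]] = {}
--     for char, tile_id in legend.items():
--         if tile_id <= 0:
--             continue
--         by_id.setdefault(tile_id, []).append(char)
--
--     selected: dict[int, str] = {}
--     for tile_id, chars in by_id.items():
--         chars_sorted = sorted(chars, key=lambda c: (priority.get(c, 10_000), c))
--         selected[tile_id] = chars_sorted[0]
--     return selected
--
-- def build_tile_spec_string(legend: dict[str, int], max_tile_id: int) -> str:
--     char_by_id = choose_char_for_tile_id(legend)
--     entries: list[str] = []
--     for tile_id in range(1, max_tile_id + 1):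
--         char = char_by_id.get(tile_id, "")
--         color = SOLID_TILE_COLORS.get(char, fallback_color_for_id(tile_id))
--         r, g, b, a = color
--         entries.append(f"{tile_id}:{r},{g},{b},{a}")
--     return ";".join(entries)
-- ===== SOURCE B (Python) =====
-- # B: one-pass running-minimum choice of a char per tile id (no per-id lists, no sorting),
-- # then the tile-spec string built with a list comprehension.
--
-- SOLID_TILE_COLORS: dict[str, tuple[int, int, int, int]] = {
--     "G": (104, 178, 76, 255),
--     ".": (104, 178, 76, 255),
--     "~": (72, 132, 224, 255),
--     "`": (48, 96, 180, 255),  # Deep water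
--     "T": (46, 108, 54, 255),
--     "F": (30, 78, 40, 255),
--     "P": (181, 152, 102, 255),
--     "S": (250, 228, 92, 255),
--     "J": (255, 161, 77, 255),
--     "M": (125, 126, 134, 255),
--     "H": (214, 123, 73, 255),
--     "C": (194, 76, 76, 255),
--     "D": (240, 95, 95, 255),
--     "N": (86, 208, 220, 255),
-- }
--
-- CHAR_PRIORITY = list(SOLID_TILE_COLORS.keys())
--
--
-- def fallback_color_for_id(tile_id: int) -> tuple[int, int, int, int]:
--     seed = (tile_id * 1103515245 + 12345) & 0xFFFFFFFF
--     r = 50 + (seed & 0x7F)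
--     g = 50 + ((seed >> 8) & 0x7F)
--     b = 50 + ((seed >> 16) & 0x7F)
--     return (r, g, b, 255)
--
--
-- def build_tile_spec_string(legend: dict[str, int], max_tile_id: int) -> str:
--     priority = {char: idx for idx, char in enumerate(CHAR_PRIORITY)}
--     best: dict[int, str] = {}
--     for char, tile_id in legend.items():
--         if tile_id <= 0:
--             continue
--         cur = best.get(tile_id)
--         if cur is None or (priority.get(char, 10_000), char) < (priority.get(cur, 10_000), cur):
--             best[tile_id] = char
--
--     def entry(tile_id: int) -> str:
--         r, g, b, a = SOLID_TILE_COLORS.get(best.get(tile_id, ""), fallback_color_for_id(tile_id))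
--         return f"{tile_id}:{r},{g},{b},{a}"
--
--     return ";".join(entry(tile_id) for tile_id in range(1, max_tile_id + 1))
-- ===== Notes on version B (the rewrite author's own statement) =====
-- stated objective: alternative
-- what changed: choose_char_for_tile_id's two-phase 'group chars into per-id lists, then sort each list and take its head' is replaced by a single reduce-style pass that keeps one best char per tile id under the (priority, char) key, and the entry list is built by a comprehension/map instead of append-in-a-loop.
import Mathlib
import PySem

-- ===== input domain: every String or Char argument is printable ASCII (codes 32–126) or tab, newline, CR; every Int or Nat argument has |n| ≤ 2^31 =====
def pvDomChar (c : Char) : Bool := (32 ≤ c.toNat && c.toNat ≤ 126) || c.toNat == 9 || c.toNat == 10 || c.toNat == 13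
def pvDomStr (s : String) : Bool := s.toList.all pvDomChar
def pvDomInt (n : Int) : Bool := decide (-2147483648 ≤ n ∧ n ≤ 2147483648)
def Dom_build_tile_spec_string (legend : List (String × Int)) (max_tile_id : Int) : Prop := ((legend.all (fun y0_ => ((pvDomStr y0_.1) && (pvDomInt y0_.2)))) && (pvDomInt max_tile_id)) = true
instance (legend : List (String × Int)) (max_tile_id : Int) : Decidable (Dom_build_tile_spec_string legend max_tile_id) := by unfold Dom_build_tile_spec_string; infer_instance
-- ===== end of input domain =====

-- B replaces A's group-into-lists-then-sort-each choice of a char per tile id by a single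
-- running-minimum pass and builds the entries by map instead of append; alternative decomposition,
-- same return value.

-- ===== shared module constants (SOLID_TILE_COLORS, CHAR_PRIORITY, fallback_color_for_id) =====
def solidTileColors : PySem.Dict String (Int × Int × Int × Int) :=
  PySem.Dict.ofList
    [("G", (104, 178, 76, 255)), (".", (104, 178, 76, 255)), ("~", (72, 132, 224, 255)),
     ("`", (48, 96, 180, 255)), ("T", (46, 108, 54, 255)), ("F", (30, 78, 40, 255)),
     ("P", (181, 152, 102, 255)), ("S", (250, 228, 92, 255)), ("J", (255, 161, 77, 255)),
     ("M", (125, 126, 134, 255)), ("H", (214, 123, 73, 255)), ("C", (194, 76, 76, 255)),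
     ("D", (240, 95, 95, 255)), ("N", (86, 208, 220, 255))]

def charPriority : List String := solidTileColors.keys

-- priority = {char: idx for idx, char in enumerate(CHAR_PRIORITY)}
def priorityDict : PySem.Dict String Int :=
  (PySem.List.enumerate charPriority).foldl (fun d p => d.insert p.2 p.1) PySem.Dict.empty

def fallback_color_for_id (tile_id : Int) : Int × Int × Int × Int :=
  let seed := PySem.Int.band (tile_id * 1103515245 + 12345) 0xFFFFFFFF
  let r := 50 + PySem.Int.band seed 0x7F
  let g := 50 + PySem.Int.band (seed >>> (8 : Nat)) 0x7F
  let b := 50 + PySem.Int.band (seed >>> (16 : Nat)) 0x7F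
  (r, g, b, 255)

-- the f-string f"{tile_id}:{r},{g},{b},{a}"
def specEntry (tile_id : Int) (color : Int × Int × Int × Int) : String :=
  PySem.Int.toStr tile_id ++ ":" ++ PySem.Int.toStr color.1 ++ "," ++ PySem.Int.toStr color.2.1
    ++ "," ++ PySem.Int.toStr color.2.2.1 ++ "," ++ PySem.Int.toStr color.2.2.2

-- ===== PORT A =====
-- choose_char_for_tile_id: group chars by positive tile id, then pick sorted(chars, key)[0] per id.
def choose_char_for_tile_id (legend : List (String × Int)) : PySem.Dict Int String :=
  let by_id : PySem.Dict Int (List String) :=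
    legend.foldl (fun d p => if p.2 ≤ 0 then d else d.modify p.2 [] (· ++ [p.1])) PySem.Dict.empty
  by_id.items.foldl
    (fun s q =>
      -- chars_sorted[0]: q.2 is nonempty by construction, headD "" is that element
      s.insert q.1 ((PySem.List.sorted2 q.2 (fun c => priorityDict.getD c 10000) (fun c => c) false).headD ""))
    PySem.Dict.empty

def build_tile_spec_string (legend : List (String × Int)) (max_tile_id : Int) : String :=
  let char_by_id := choose_char_for_tile_id legend
  let entries : List String :=
    (PySem.List.pyRange 1 (max_tile_id + 1) 1).foldl
      (fun es tile_id =>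
        let ch := char_by_id.getD tile_id ""
        let color := solidTileColors.getD ch (fallback_color_for_id tile_id)
        es ++ [specEntry tile_id color]) []
  PySem.Str.join ";" entries

-- ===== PORT B =====
-- Python tuple comparison (p1, c1) < (p2, c2), components written out (Int then String).
def pairLt (p q : Int × String) : Bool := decide (p.1 < q.1) || (decide (p.1 = q.1) && decide (p.2 < q.2))

def build_tile_spec_string_alt (legend : List (String × Int)) (max_tile_id : Int) : String :=
  let key : String → Int × String := fun c => (priorityDict.getD c 10000, c)
  let best : PySem.Dict Int String :=
    legend.foldl
      (fun (d : PySem.Dict Int String) (p : String × Int) =>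
        if p.2 ≤ 0 then d
        else
          match d.get? p.2 with
          | none => d.insert p.2 p.1
          | some cur => if pairLt (key p.1) (key cur) then d.insert p.2 p.1 else d)
      PySem.Dict.empty
  PySem.Str.join ";"
    ((PySem.List.pyRange 1 (max_tile_id + 1) 1).map
      (fun tile_id => specEntry tile_id (solidTileColors.getD (best.getD tile_id "") (fallback_color_for_id tile_id))))

-- ===== PRECONDITION & SPEC =====
def Spec_build_tile_spec_string (legend : List (String × Int)) (max_tile_id : Int) (out : String) : Prop := out = build_tile_spec_string_alt legend max_tile_id
instance (legend : List (String × Int)) (max_tile_id : Int) (out : String) : Decidable (Spec_build_tile_spec_string legend max_tile_id out) := by unfold Spec_build_tile_spec_string; infer_instance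

-- ===== CLAIM (what is proved, stated in full; the proofs are below) =====
def Claim_equal_build_tile_spec_string : Prop := ∀ (legend : List (String × Int)) (max_tile_id : Int), Dom_build_tile_spec_string legend max_tile_id → Spec_build_tile_spec_string legend max_tile_id (build_tile_spec_string legend max_tile_id)

-- ===== LEMMAS AND PROOFS =====

-- candidate chars for tile id t, in legend order (positive ids only)
def candsOf (legend : List (String × Int)) (t : Int) : List String :=
  (legend.filter (fun p => !decide (p.2 ≤ 0) && p.2 == t)).map (·.1)

def k1 (c : String) : Int := priorityDict.getD c 10000

-- one step of B's running minimum
def rmStep (o : Option String) (c : String) : Option String :=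
  match o with
  | none => some c
  | some m => if pairLt (k1 c, c) (k1 m, m) then some c else some m

-- one step of the bare running minimum (head of the sorted candidate list)
def mstep (m x : String) : String := if pairLt (k1 x, x) (k1 m, m) then x else m

-- sorted2's comparator at our keys IS the Python tuple < that B uses
theorem before'_eq_pairLt (a b : String) :
    (decide (k1 a < k1 b) || (!decide (k1 b < k1 a) && decide (a < b))) = pairLt (k1 a, a) (k1 b, b) := by
  unfold pairLt
  rcases lt_trichotomy (k1 a) (k1 b) with h | h | h
  · simp [h, not_lt_of_gt h]
  · simp [h]
  · simp [not_lt_of_gt h, ne_of_gt h, h]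

theorem insertBy_ne_nil {α : Type} (bef : α → α → Bool) (x : α) (acc : List α) :
    PySem.List.insertBy bef x acc ≠ [] := by
  cases acc with
  | nil => simp [PySem.List.insertBy]
  | cons y ys => simp only [PySem.List.insertBy]; split <;> simp

theorem headD_insertBy {α : Type} (bef : α → α → Bool) (x : α) (acc : List α) (d : α) :
    (PySem.List.insertBy bef x acc).headD d =
      (match acc with | [] => x | y :: _ => if bef x y then x else y) := by
  cases acc with
  | nil => simp [PySem.List.insertBy]
  | cons y ys => simp only [PySem.List.insertBy]; split <;> simp_all

theorem headD_foldl_insertBy {α : Type} (bef : α → α → Bool) (d : α) :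
    ∀ (t : List α) (acc : List α), acc ≠ [] →
      ((t.foldl (fun a x => PySem.List.insertBy bef x a) acc).headD d) =
        t.foldl (fun m x => if bef x m then x else m) (acc.headD d) := by
  intro t
  induction t with
  | nil => intro acc _; rfl
  | cons x xs ih =>
    intro acc hacc
    cases acc with
    | nil => exact absurd rfl hacc
    | cons y ys =>
      simp only [List.foldl_cons]
      rw [ih _ (insertBy_ne_nil bef x (y :: ys)), headD_insertBy]
      simp

theorem runmin_some (m : String) : ∀ (t : List String),
    t.foldl rmStep (some m) = some (t.foldl mstep m) := by
  intro t
  induction t generalizing m with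
  | nil => rfl
  | cons x xs ih =>
    simp only [List.foldl_cons]
    rw [show rmStep (some m) x = some (mstep m x) from by
      simp only [rmStep, mstep]; split <;> rfl, ih]

-- head of the stable sort = the running minimum (A's pick = B's pick on one candidate list)
theorem pick_eq_runmin (cs : List String) :
    (if cs = [] then none else
      some ((PySem.List.sorted2 cs (fun c => priorityDict.getD c 10000) (fun c => c) false).headD "")) =
    cs.foldl rmStep none := by
  cases cs with
  | nil => rfl
  | cons c t =>
    rw [if_neg (by simp), List.foldl_cons,
      show rmStep none c = some c from rfl, runmin_some]
    congr 1
    have hbef : (fun a b : String => decide (k1 a < k1 b) || (!decide (k1 b < k1 a) && decide (a < b)))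
        = fun a b => pairLt (k1 a, a) (k1 b, b) := by
      funext a b
      exact before'_eq_pairLt a b
    have hs : PySem.List.sorted2 (c :: t) (fun c => priorityDict.getD c 10000) (fun c => c) false =
        t.foldl (fun a x => PySem.List.insertBy (fun a b => pairLt (k1 a, a) (k1 b, b)) x a)
          (PySem.List.insertBy (fun a b => pairLt (k1 a, a) (k1 b, b)) c []) := by
      show List.foldl _ [] (c :: t) = _
      rw [List.foldl_cons, ← hbef]
      rfl
    rw [hs, headD_foldl_insertBy _ "" t _ (insertBy_ne_nil _ _ _)]
    simp only [PySem.List.insertBy, List.headD_cons]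
    apply PySem.List.foldl_congr_mem
    intro acc x _
    simp only [mstep]

-- A's grouping loop rewritten as an unguarded modify-loop over swapped pairs
theorem byid_eq_foldl_pairs (legend : List (String × Int)) :
    legend.foldl (fun d p => if p.2 ≤ 0 then d else d.modify p.2 [] (· ++ [p.1])) PySem.Dict.empty =
      ((legend.filter (fun p => !decide (p.2 ≤ 0))).map (fun p => (p.2, p.1))).foldl
        (fun d q => d.modify q.1 [] (· ++ [q.2])) PySem.Dict.empty := by
  rw [List.foldl_map]
  dsimp only
  rw [← PySem.List.foldl_if_eq_foldl_filter (p := fun (p : String × Int) => !decide (p.2 ≤ 0))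
    (f := fun (d : PySem.Dict Int (List String)) (p : String × Int) => d.modify p.2 [] (· ++ [p.1]))]
  apply PySem.List.foldl_congr_mem
  intro acc x _
  by_cases h : x.2 ≤ 0 <;> simp [h]

theorem byid_getD (legend : List (String × Int)) (t : Int) :
    (legend.foldl (fun d p => if p.2 ≤ 0 then d else d.modify p.2 [] (· ++ [p.1])) PySem.Dict.empty).getD t []
      = candsOf legend t := by
  rw [byid_eq_foldl_pairs, PySem.Dict.getD_foldl_modify_append]
  unfold candsOf
  simp only [List.filter_map, List.map_map, List.filter_filter, Function.comp_def,
    PySem.Dict.getD_empty, List.nil_append]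
  congr 1
  apply List.filter_congr
  intro a _
  exact Bool.and_comm _ _

theorem byid_keys_nodup (legend : List (String × Int)) :
    (legend.foldl (fun d p => if p.2 ≤ 0 then d else d.modify p.2 [] (· ++ [p.1])) PySem.Dict.empty).keys.Nodup := by
  rw [byid_eq_foldl_pairs]
  exact PySem.Dict.nodup_keys_foldl_modify_key
    (l := (legend.filter (fun p => !decide (p.2 ≤ 0))).map (fun p => (p.2, p.1)))
    (key := Prod.fst) (d0 := []) (f := fun _ q v => v ++ [q.2]) _ PySem.Dict.nodup_keys_empty

theorem byid_mem_keys (legend : List (String × Int)) (t : Int) :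
    t ∈ (legend.foldl (fun d p => if p.2 ≤ 0 then d else d.modify p.2 [] (· ++ [p.1])) PySem.Dict.empty).keys
      ↔ candsOf legend t ≠ [] := by
  rw [byid_eq_foldl_pairs, PySem.Dict.keys_foldl_modify_key (key := Prod.fst),
    show (PySem.Dict.empty : PySem.Dict Int (List String)).keys = [] from rfl,
    PySem.Set.update_nil_left, PySem.Set.mem_ofList]
  unfold candsOf
  simp only [List.mem_map, List.mem_filter, ne_eq, List.map_eq_nil_iff,
    List.filter_eq_nil_iff, not_forall, Bool.and_eq_true, beq_iff_eq, Bool.not_eq_true',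
    decide_eq_false_iff_not]
  constructor
  · rintro ⟨a, ⟨p, ⟨hpm, hp0⟩, rfl⟩, ht⟩
    exact ⟨p, hpm, by simp_all⟩
  · rintro ⟨p, hpm, h⟩
    rw [not_not] at h
    exact ⟨(p.2, p.1), ⟨p, ⟨hpm, h.1⟩, rfl⟩, h.2⟩

-- every Dict lookup is find? on its items
theorem get?_items_find {ν : Type} (d : PySem.Dict Int ν) (t : Int) :
    d.get? t = (d.items.find? (fun q => q.1 == t)).map (·.2) := rfl

-- A's 'selected' loop: lookup through a fresh-key insert loop over items
theorem sel_get? (d : PySem.Dict Int (List String)) (hnd : d.keys.Nodup) (f : List String → String) (t : Int) :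
    (d.items.foldl (fun s q => s.insert q.1 (f q.2)) PySem.Dict.empty).get? t = (d.get? t).map f := by
  have hitems := PySem.Dict.items_foldl_insert_fresh d.items Prod.fst (fun q => f q.2) PySem.Dict.empty
    (by intro a _; rfl) hnd
  have heq : (d.items.foldl (fun s q => s.insert q.1 (f q.2)) PySem.Dict.empty) =
      PySem.Dict.mk (d.items.map (fun q => (q.1, f q.2))) := by
    apply PySem.Dict.ext
    simpa using hitems
  rw [heq, get?_items_find, get?_items_find]
  rw [show (PySem.Dict.mk (d.items.map (fun q => (q.1, f q.2)))).items
      = d.items.map (fun q => (q.1, f q.2)) from rfl]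
  rw [List.find?_map]
  simp [Option.map_map, Function.comp_def]

-- B's loop: lookup at t is the running minimum over the candidates, from any start dict
theorem best_get? (legend : List (String × Int)) (t : Int) : ∀ (d : PySem.Dict Int String),
    (legend.foldl
      (fun d p =>
        if p.2 ≤ 0 then d
        else
          match d.get? p.2 with
          | none => d.insert p.2 p.1
          | some cur => if pairLt (priorityDict.getD p.1 10000, p.1) (priorityDict.getD cur 10000, cur) then d.insert p.2 p.1 else d)
      d).get? t = (candsOf legend t).foldl rmStep (d.get? t) := by
  induction legend with
  | nil => intro d; rfl
  | cons p l ih =>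
    intro d
    simp only [List.foldl_cons]
    unfold candsOf
    simp only [List.filter_cons]
    by_cases h0 : p.2 ≤ 0
    · simp only [h0, decide_true, Bool.not_true, Bool.false_and, Bool.false_eq_true, reduceIte]
      exact ih d
    · by_cases ht : p.2 = t
      · subst ht
        simp only [h0, decide_false, Bool.not_false, Bool.true_and, beq_self_eq_true,
          reduceIte, List.map_cons, List.foldl_cons]
        rw [ih]
        congr 1
        cases hget : d.get? p.2 with
        | none =>
          simp only [rmStep]
          exact PySem.Dict.get?_insert_self _ _ _
        | some cur =>
          simp only [rmStep, k1]
          split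
          · exact PySem.Dict.get?_insert_self _ _ _
          · exact hget
      · have hbeq : (p.2 == t) = false := by simp [ht]
        simp only [h0, decide_false, Bool.not_false, Bool.true_and, hbeq,
          Bool.false_eq_true, reduceIte]
        rw [ih]
        congr 1
        cases hget : d.get? p.2 with
        | none =>
          exact PySem.Dict.get?_insert_of_ne _ _ (Ne.symm ht)
        | some cur =>
          simp only []
          split
          · exact PySem.Dict.get?_insert_of_ne _ _ (Ne.symm ht)
          · rfl

theorem main_lemma : ∀ (legend : List (String × Int)) (t : Int),
    (choose_char_for_tile_id legend).getD t "" =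
      (legend.foldl
        (fun d p =>
          if p.2 ≤ 0 then d
          else
            match d.get? p.2 with
            | none => d.insert p.2 p.1
            | some cur => if pairLt (priorityDict.getD p.1 10000, p.1) (priorityDict.getD cur 10000, cur) then d.insert p.2 p.1 else d)
        PySem.Dict.empty).getD t "" := by
  intro legend t
  rw [PySem.Dict.getD_eq_get?_getD, PySem.Dict.getD_eq_get?_getD]
  rw [best_get? legend t PySem.Dict.empty]
  unfold choose_char_for_tile_id
  dsimp only
  rw [sel_get? _ (byid_keys_nodup legend)
    (fun v => (PySem.List.sorted2 v (fun c => priorityDict.getD c 10000) (fun c => c) false).headD "") t]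
  rw [show (PySem.Dict.empty : PySem.Dict Int String).get? t = none from rfl]
  rw [← pick_eq_runmin (candsOf legend t)]
  by_cases hc : candsOf legend t = []
  · have hnone : (legend.foldl (fun d p => if p.2 ≤ 0 then d else d.modify p.2 [] (· ++ [p.1])) PySem.Dict.empty).get? t = none := by
      rw [PySem.Dict.get?_eq_none_iff_not_mem_keys, byid_mem_keys]
      simpa using hc
    rw [hnone, if_pos hc]
    rfl
  · have hmem : t ∈ (legend.foldl (fun d p => if p.2 ≤ 0 then d else d.modify p.2 [] (· ++ [p.1])) PySem.Dict.empty).keys :=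
      (byid_mem_keys legend t).mpr hc
    have hsome : (legend.foldl (fun d p => if p.2 ≤ 0 then d else d.modify p.2 [] (· ++ [p.1])) PySem.Dict.empty).get? t
        = some (candsOf legend t) := by
      rw [← byid_getD legend t, PySem.Dict.getD_eq_get?_getD]
      cases hg : (legend.foldl (fun d p => if p.2 ≤ 0 then d else d.modify p.2 [] (· ++ [p.1])) PySem.Dict.empty).get? t with
      | none => exact absurd (PySem.Dict.get?_eq_none_iff_not_mem_keys _ _ |>.mp hg) (by simpa using hmem)
      | some v => rfl
    rw [hsome, if_neg hc]
    rfl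

-- ===== VERDICT (by name: the statement is the Claim_ definition above) =====
theorem build_tile_spec_string_spec : Claim_equal_build_tile_spec_string := by
  intro legend max_tile_id _
  unfold Spec_build_tile_spec_string build_tile_spec_string build_tile_spec_string_alt
  dsimp only
  rw [PySem.List.foldl_append_singleton_eq_map
    (f := fun tile_id => specEntry tile_id (solidTileColors.getD ((choose_char_for_tile_id legend).getD tile_id "") (fallback_color_for_id tile_id)))]
  simp only [List.nil_append]
  congr 1
  apply List.map_congr_left
  intro t _
  rw [main_lemma]
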